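-- pv_equiv track=rewrite | github.com/giolux1235/energyplus-mcp-wrapper | ultimate-parser.py | _determine_building_type
-- ===== SOURCE A (Python) =====
-- from typing import Dict, List, Any, Optional, Tuple
--
-- def _determine_building_type(content: str, zones: List[Dict]) -> str:
--     """Determine building type"""
--     zone_names = [zone.get('name', '').lower() for zone in zones]
--
--     # Check for specific building types
--     if any('retail' in name or 'store' in name or 'supermarket' in name for name in zone_names):
--         return 'retail'
--     elif any('office' in name or 'work' in name for name in zone_names):
--         return 'office'
--     elif any('residential' in name or 'apartment' in name or 'home' in name for name in zone_names):
--         return 'residential'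
--     elif any('school' in name or 'education' in name for name in zone_names):
--         return 'education'
--     elif any('hospital' in name or 'medical' in name for name in zone_names):
--         return 'healthcare'
--     else:
--         return 'office'  # Default
-- ===== SOURCE B (Python) =====
-- def _determine_building_type(content, zones):
--     """Determine building type: gather matched categories in one pass, then pick by priority."""
--     found = set()
--     for zone in zones:
--         name = zone.get('name', '').lower()
--         if 'retail' in name or 'store' in name or 'supermarket' in name:
--             found.add('retail')
--         if 'office' in name or 'work' in name:
--             found.add('office')
--         if 'residential' in name or 'apartment' in name or 'home' in name:
--             found.add('residential')
--         if 'school' in name or 'education' in name: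
--             found.add('education')
--         if 'hospital' in name or 'medical' in name:
--             found.add('healthcare')
--     for cat in ('retail', 'office', 'residential', 'education', 'healthcare'):
--         if cat in found:
--             return cat
--     return 'office'
-- ===== Notes on version B (the rewrite author's own statement) =====
-- stated objective: alternative
-- what changed: B makes a single pass over the zone names, collecting every matching category into a set, then returns the first category of the fixed priority list present in the set (default 'office'), instead of A's five separate full any() rescans of the zone-name list.
import Mathlib
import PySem

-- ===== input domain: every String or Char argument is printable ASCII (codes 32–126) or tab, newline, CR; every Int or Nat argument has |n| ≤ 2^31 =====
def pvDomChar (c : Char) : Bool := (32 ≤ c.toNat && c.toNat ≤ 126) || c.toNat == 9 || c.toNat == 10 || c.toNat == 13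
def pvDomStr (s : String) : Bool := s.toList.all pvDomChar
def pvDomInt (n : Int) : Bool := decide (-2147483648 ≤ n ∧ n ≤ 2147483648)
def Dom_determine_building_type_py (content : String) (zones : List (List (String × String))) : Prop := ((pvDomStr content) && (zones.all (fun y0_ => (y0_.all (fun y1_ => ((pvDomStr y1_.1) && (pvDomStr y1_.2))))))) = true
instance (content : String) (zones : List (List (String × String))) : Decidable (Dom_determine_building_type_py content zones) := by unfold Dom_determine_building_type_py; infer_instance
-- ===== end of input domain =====

-- B gathers all matching categories in ONE pass over the zone names into a set, then selects the
-- first category of the fixed priority list; A instead makes five separate any() scans of the list.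

-- ===== PORT A =====
def determine_building_type_py (content : String) (zones : List (List (String × String))) : String :=
  let zone_names := zones.map (fun zone => PySem.Str.lower (PySem.Dict.getD ⟨zone⟩ "name" ""))
  if zone_names.any (fun name => PySem.Str.isIn "retail" name || PySem.Str.isIn "store" name || PySem.Str.isIn "supermarket" name) then "retail"
  else if zone_names.any (fun name => PySem.Str.isIn "office" name || PySem.Str.isIn "work" name) then "office"
  else if zone_names.any (fun name => PySem.Str.isIn "residential" name || PySem.Str.isIn "apartment" name || PySem.Str.isIn "home" name) then "residential"
  else if zone_names.any (fun name => PySem.Str.isIn "school" name || PySem.Str.isIn "education" name) then "education"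
  else if zone_names.any (fun name => PySem.Str.isIn "hospital" name || PySem.Str.isIn "medical" name) then "healthcare"
  else "office"

-- ===== PORT B =====
-- body of B's single loop over zones: add every category whose keyword occurs in this zone's name
def pvStepB (found : PySem.Set String) (zone : List (String × String)) : PySem.Set String :=
  let name := PySem.Str.lower (PySem.Dict.getD ⟨zone⟩ "name" "")
  let f1 := if PySem.Str.isIn "retail" name || PySem.Str.isIn "store" name || PySem.Str.isIn "supermarket" name then PySem.Set.add found "retail" else found
  let f2 := if PySem.Str.isIn "office" name || PySem.Str.isIn "work" name then PySem.Set.add f1 "office" else f1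
  let f3 := if PySem.Str.isIn "residential" name || PySem.Str.isIn "apartment" name || PySem.Str.isIn "home" name then PySem.Set.add f2 "residential" else f2
  let f4 := if PySem.Str.isIn "school" name || PySem.Str.isIn "education" name then PySem.Set.add f3 "education" else f3
  if PySem.Str.isIn "hospital" name || PySem.Str.isIn "medical" name then PySem.Set.add f4 "healthcare" else f4

def determine_building_type_py_alt (content : String) (zones : List (List (String × String))) : String :=
  let found := zones.foldl pvStepB PySem.Set.empty
  match ["retail", "office", "residential", "education", "healthcare"].find? (fun cat => PySem.Set.contains found cat) with
  | some cat => cat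
  | none => "office"

-- ===== PRECONDITION & SPEC =====
def Spec_determine_building_type_py (content : String) (zones : List (List (String × String))) (out : String) : Prop := out = determine_building_type_py_alt content zones
instance (content : String) (zones : List (List (String × String))) (out : String) : Decidable (Spec_determine_building_type_py content zones out) := by unfold Spec_determine_building_type_py; infer_instance

-- ===== CLAIM (what is proved, stated in full; the proofs are below) =====
def Claim_equal_determine_building_type_py : Prop := ∀ (content : String) (zones : List (List (String × String))), Dom_determine_building_type_py content zones → Spec_determine_building_type_py content zones (determine_building_type_py content zones)

-- ===== LEMMAS AND PROOFS =====

-- the lowered zone name and the five keyword tests (proof-side abbreviations)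
def pvName (zone : List (String × String)) : String := PySem.Str.lower (PySem.Dict.getD ⟨zone⟩ "name" "")
def pvHasRet (z : List (String × String)) : Bool := PySem.Str.isIn "retail" (pvName z) || PySem.Str.isIn "store" (pvName z) || PySem.Str.isIn "supermarket" (pvName z)
def pvHasOff (z : List (String × String)) : Bool := PySem.Str.isIn "office" (pvName z) || PySem.Str.isIn "work" (pvName z)
def pvHasRes (z : List (String × String)) : Bool := PySem.Str.isIn "residential" (pvName z) || PySem.Str.isIn "apartment" (pvName z) || PySem.Str.isIn "home" (pvName z)
def pvHasEdu (z : List (String × String)) : Bool := PySem.Str.isIn "school" (pvName z) || PySem.Str.isIn "education" (pvName z)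
def pvHasHea (z : List (String × String)) : Bool := PySem.Str.isIn "hospital" (pvName z) || PySem.Str.isIn "medical" (pvName z)

theorem pvMemIteAdd (s : PySem.Set String) (b : Bool) (x c : String) :
    (c ∈ if b = true then PySem.Set.add s x else s) ↔ c ∈ s ∨ (c = x ∧ b = true) := by
  cases b <;> simp [PySem.Set.mem_add]

theorem pvStepB_mem (found : PySem.Set String) (z : List (String × String)) (c : String) :
    c ∈ pvStepB found z ↔ c ∈ found ∨ (c = "retail" ∧ pvHasRet z = true) ∨ (c = "office" ∧ pvHasOff z = true)
      ∨ (c = "residential" ∧ pvHasRes z = true) ∨ (c = "education" ∧ pvHasEdu z = true) ∨ (c = "healthcare" ∧ pvHasHea z = true) := by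
  simp only [pvStepB, pvMemIteAdd, pvHasRet, pvHasOff, pvHasRes, pvHasEdu, pvHasHea, pvName, or_assoc]

theorem pvShuffle (m a1 a2 a3 a4 a5 b1 b2 b3 b4 b5 : Prop) :
    (((m ∨ a1 ∨ a2 ∨ a3 ∨ a4 ∨ a5) ∨ b1 ∨ b2 ∨ b3 ∨ b4 ∨ b5) ↔
      (m ∨ (a1 ∨ b1) ∨ (a2 ∨ b2) ∨ (a3 ∨ b3) ∨ (a4 ∨ b4) ∨ (a5 ∨ b5))) := by
  tauto

theorem pvFoldB_mem (zones : List (List (String × String))) (found : PySem.Set String) (c : String) :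
    c ∈ zones.foldl pvStepB found ↔ c ∈ found ∨ (c = "retail" ∧ zones.any pvHasRet = true) ∨ (c = "office" ∧ zones.any pvHasOff = true)
      ∨ (c = "residential" ∧ zones.any pvHasRes = true) ∨ (c = "education" ∧ zones.any pvHasEdu = true) ∨ (c = "healthcare" ∧ zones.any pvHasHea = true) := by
  induction zones generalizing found with
  | nil => simp
  | cons z zs ih =>
    simp only [List.foldl_cons, List.any_cons, ih, pvStepB_mem, Bool.or_eq_true, and_or_left, pvShuffle]

-- the common value of both programs, written as A's priority chain over the five scans
def pvChain (zones : List (List (String × String))) : String :=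
  if zones.any (fun z => pvHasRet z) then "retail"
  else if zones.any (fun z => pvHasOff z) then "office"
  else if zones.any (fun z => pvHasRes z) then "residential"
  else if zones.any (fun z => pvHasEdu z) then "education"
  else if zones.any (fun z => pvHasHea z) then "healthcare"
  else "office"

theorem pvA_eq (content : String) (zones : List (List (String × String))) :
    determine_building_type_py content zones = pvChain zones := by
  simp only [determine_building_type_py, pvChain, List.any_map, Function.comp_def,
    pvHasRet, pvHasOff, pvHasRes, pvHasEdu, pvHasHea, pvName]
  rfl

theorem pvContains_fold (zones : List (List (String × String))) (c : String) :
    PySem.Set.contains (zones.foldl pvStepB PySem.Set.empty) c = true ↔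
      (c = "retail" ∧ zones.any pvHasRet = true) ∨ (c = "office" ∧ zones.any pvHasOff = true)
      ∨ (c = "residential" ∧ zones.any pvHasRes = true) ∨ (c = "education" ∧ zones.any pvHasEdu = true) ∨ (c = "healthcare" ∧ zones.any pvHasHea = true) := by
  rw [PySem.Set.contains, List.contains_iff_mem, pvFoldB_mem]
  simp [PySem.Set.empty]

theorem pvContains_eq (zones : List (List (String × String))) (c : String) (p : List (String × String) → Bool)
    (h : PySem.Set.contains (zones.foldl pvStepB PySem.Set.empty) c = true ↔ zones.any p = true) :
    PySem.Set.contains (zones.foldl pvStepB PySem.Set.empty) c = zones.any p := by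
  cases hx : PySem.Set.contains (zones.foldl pvStepB PySem.Set.empty) c <;>
  cases hy : zones.any p <;> simp_all

theorem pvB_eq (content : String) (zones : List (List (String × String))) :
    determine_building_type_py_alt content zones = pvChain zones := by
  have eR : PySem.Set.contains (zones.foldl pvStepB PySem.Set.empty) "retail" = zones.any pvHasRet := by
    apply pvContains_eq; rw [pvContains_fold]; simp
  have eO : PySem.Set.contains (zones.foldl pvStepB PySem.Set.empty) "office" = zones.any pvHasOff := by
    apply pvContains_eq; rw [pvContains_fold]; simp
  have eRes : PySem.Set.contains (zones.foldl pvStepB PySem.Set.empty) "residential" = zones.any pvHasRes := by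
    apply pvContains_eq; rw [pvContains_fold]; simp
  have eE : PySem.Set.contains (zones.foldl pvStepB PySem.Set.empty) "education" = zones.any pvHasEdu := by
    apply pvContains_eq; rw [pvContains_fold]; simp
  have eH : PySem.Set.contains (zones.foldl pvStepB PySem.Set.empty) "healthcare" = zones.any pvHasHea := by
    apply pvContains_eq; rw [pvContains_fold]; simp
  simp only [determine_building_type_py_alt, List.find?, eR, eO, eRes, eE, eH, pvChain]
  cases h1 : zones.any pvHasRet <;>
  cases h2 : zones.any pvHasOff <;>
  cases h3 : zones.any pvHasRes <;>
  cases h4 : zones.any pvHasEdu <;>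
  cases h5 : zones.any pvHasHea <;>
    simp only [h1, h2, h3, h4, h5, Bool.false_eq_true, ite_false, ite_true]

-- ===== VERDICT (by name: the statement is the Claim_ definition above) =====
theorem determine_building_type_py_spec : Claim_equal_determine_building_type_py := by
  intro content zones _
  show determine_building_type_py content zones = determine_building_type_py_alt content zones
  rw [pvA_eq, pvB_eq]
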